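-- pv_equiv track=rewrite | github.com/qeedquan/challenges | codewars/make-everyone-happy.py | smile
-- ===== SOURCE A (Python) =====
-- def smile(sentence):
--     for c0 in ":;=":
--         for c1 in " -~":
--             for c2 in "([":
--                 c3 = ')'
--                 if c2 == '[':
--                     c3 = ']'
--
--                 sad = c0 + c1 + c2
--                 happy = c0 + c1 + c3
--                 if c1 == ' ':
--                     sad = c0 + c2
--                     happy = c0 + c3
--
--                 sentence = sentence.replace(sad, happy)
--     return sentence
-- ===== SOURCE B (Python) =====
-- def smile(sentence):
--     eyes, noses, mouths = ":;=", "-~", "(["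
--     close = {'(': ')', '[': ']'}
--     out = []
--     i, n = 0, len(sentence)
--     while i < n:
--         c = sentence[i]
--         if c in eyes and i + 1 < n:
--             d = sentence[i + 1]
--             if d in mouths:
--                 out.append(c)
--                 out.append(close[d])
--                 i += 2
--                 continue
--             if d in noses and i + 2 < n and sentence[i + 2] in mouths:
--                 out.append(c)
--                 out.append(d)
--                 out.append(close[sentence[i + 2]])
--                 i += 3
--                 continue
--         out.append(c)
--         i += 1
--     return "".join(out)
-- ===== Notes on version B (the rewrite author's own statement) =====
-- stated objective: alternative
-- what changed: Replaced A's 18 full-string replace passes (triple nested loop over eye/nose/mouth combinations) with a single left-to-right scan that recognizes eye + optional nose + mouth at each position and rewrites the mouth in place.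
import Mathlib
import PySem

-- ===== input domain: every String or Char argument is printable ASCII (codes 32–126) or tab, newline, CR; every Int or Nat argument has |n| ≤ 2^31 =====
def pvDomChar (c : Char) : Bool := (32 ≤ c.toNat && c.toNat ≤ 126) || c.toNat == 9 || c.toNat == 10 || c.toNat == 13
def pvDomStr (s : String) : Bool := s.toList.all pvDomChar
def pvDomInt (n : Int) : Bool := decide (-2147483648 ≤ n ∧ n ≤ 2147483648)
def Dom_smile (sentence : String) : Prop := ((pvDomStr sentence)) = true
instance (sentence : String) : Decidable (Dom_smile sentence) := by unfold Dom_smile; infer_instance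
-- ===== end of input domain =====

-- B replaces A's 18 full-string replace passes by a single left-to-right scan (same return value).

-- ===== PORT A =====
def smile (sentence : String) : String :=
  (":;=".toList).foldl (fun s1 c0 =>
    (" -~".toList).foldl (fun s2 c1 =>
      ("([".toList).foldl (fun s3 c2 =>
        let c3 : Char := if c2 = '[' then ']' else ')'
        let sad : String := if c1 = ' ' then String.ofList [c0, c2] else String.ofList [c0, c1, c2]
        let happy : String := if c1 = ' ' then String.ofList [c0, c3] else String.ofList [c0, c1, c3]
        PySem.Str.replace s3 sad happy) s2) s1) sentence

-- ===== PORT B =====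
def isEye (c : Char) : Bool := c = ':' || c = ';' || c = '='
def isNose (c : Char) : Bool := c = '-' || c = '~'
def isMouth (c : Char) : Bool := c = '(' || c = '['
def closeCh (c : Char) : Char := if c = '(' then ')' else ']'

def scanChars : List Char → List Char
  | [] => []
  | [c] => [c]
  | c :: d :: rest =>
    if isEye c && isMouth d then c :: closeCh d :: scanChars rest
    else if isEye c && isNose d then
      match rest with
      | [] => [c, d]
      | m :: rest2 =>
        if isMouth m then c :: d :: closeCh m :: scanChars rest2
        else c :: scanChars (d :: m :: rest2)
    else c :: scanChars (d :: rest)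
termination_by structural l => l

def smile_alt (sentence : String) : String := String.ofList (scanChars sentence.toList)

-- ===== PRECONDITION & SPEC =====
def Spec_smile (sentence : String) (out : String) : Prop := out = smile_alt sentence
instance (sentence : String) (out : String) : Decidable (Spec_smile sentence out) := by unfold Spec_smile; infer_instance

-- ===== CLAIM (what is proved, stated in full; the proofs are below) =====
def Claim_equal_smile : Prop := ∀ (sentence : String), Dom_smile sentence → Spec_smile sentence (smile sentence)

-- ===== LEMMAS AND PROOFS =====

/-- One replace pass, written as the left-to-right scan that `PySem.Chars.replace` performs
(the pattern is `o0 :: orest`, so it is never empty). -/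
def repScan (o0 : Char) (orest new : List Char) : List Char → List Char
  | [] => []
  | c :: t =>
    if (o0 :: orest).isPrefixOf (c :: t) then new ++ repScan o0 orest new (t.drop orest.length)
    else c :: repScan o0 orest new t
termination_by l => l.length
decreasing_by all_goals simp

/-- A's 18 replace passes, applied in order. -/
def chain (ps : List (Char × List Char × List Char)) (l : List Char) : List Char :=
  ps.foldl (fun s pr => repScan pr.1 pr.2.1 pr.2.2 s) l

def P18 : List (Char × List Char × List Char) :=
  [(':', ['('], [':', ')']),
   (':', ['['], [':', ']']),
   (':', ['-', '('], [':', '-', ')']),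
   (':', ['-', '['], [':', '-', ']']),
   (':', ['~', '('], [':', '~', ')']),
   (':', ['~', '['], [':', '~', ']']),
   (';', ['('], [';', ')']),
   (';', ['['], [';', ']']),
   (';', ['-', '('], [';', '-', ')']),
   (';', ['-', '['], [';', '-', ']']),
   (';', ['~', '('], [';', '~', ')']),
   (';', ['~', '['], [';', '~', ']']),
   ('=', ['('], ['=', ')']),
   ('=', ['['], ['=', ']']),
   ('=', ['-', '('], ['=', '-', ')']),
   ('=', ['-', '['], ['=', '-', ']']),
   ('=', ['~', '('], ['=', '~', ')']),
   ('=', ['~', '['], ['=', '~', ']'])]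


/-- Per-character flip relation: a char is unchanged or has become a closing bracket. -/
def RelC (a b : Char) : Prop := b = a ∨ b = ')' ∨ b = ']'

/-- Pointwise flip relation between a string and its image under replace passes. -/
def FlipRel : List Char → List Char → Prop
  | [], [] => True
  | _ :: _, [] => False
  | [], _ :: _ => False
  | a :: x, b :: y => RelC a b ∧ FlipRel x y

def relCB (a b : Char) : Bool := b == a || b == ')' || b == ']'

def relB : List Char → List Char → Bool
  | [], [] => true
  | a :: x, b :: y => relCB a b && relB x y
  | _, _ => false

lemma relC_refl (a : Char) : RelC a a := Or.inl rfl

lemma relC_trans {a b c : Char} (h1 : RelC a b) (h2 : RelC b c) : RelC a c := by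
  rcases h2 with rfl | rfl | rfl
  · exact h1
  · exact Or.inr (Or.inl rfl)
  · exact Or.inr (Or.inr rfl)

lemma rel_refl : ∀ l : List Char, FlipRel l l
  | [] => trivial
  | _ :: x => ⟨relC_refl _, rel_refl x⟩

lemma rel_of_relB : ∀ x y, relB x y = true → FlipRel x y
  | [], [], _ => trivial
  | a :: x, b :: y, h => by
    simp only [relB, Bool.and_eq_true, relCB, Bool.or_eq_true, beq_iff_eq] at h
    exact ⟨by rcases h.1 with (h | h) | h <;> simp [RelC, h], rel_of_relB x y h.2⟩
  | [], _ :: _, h => by simp [relB] at h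
  | _ :: _, [], h => by simp [relB] at h

lemma rel_cons_intro {a b : Char} {x y : List Char} (h1 : RelC a b) (h2 : FlipRel x y) :
    FlipRel (a :: x) (b :: y) := show RelC a b ∧ FlipRel x y from ⟨h1, h2⟩

lemma rel_cons {a : Char} {x y : List Char} (h : FlipRel (a :: x) y) :
    ∃ b y', y = b :: y' ∧ RelC a b ∧ FlipRel x y' := by
  cases y with
  | nil => exact absurd h (by simp [FlipRel])
  | cons b y' => exact ⟨b, y', rfl, h.1, h.2⟩

lemma rel_trans : ∀ {x y z : List Char}, FlipRel x y → FlipRel y z → FlipRel x z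
  | [], [], [], _, _ => trivial
  | _ :: _, _ :: _, _ :: _, h1, h2 => ⟨relC_trans h1.1 h2.1, rel_trans h1.2 h2.2⟩
  | [], _ :: _, _, h1, _ => absurd h1 (by simp [FlipRel])
  | _ :: _, [], _, h1, _ => absurd h1 (by simp [FlipRel])
  | _ :: _, _ :: _, [], _, h2 => absurd h2 (by simp [FlipRel])

lemma rel_append : ∀ {a b : List Char} (c d : List Char), FlipRel a b → FlipRel c d → FlipRel (a ++ c) (b ++ d)
  | [], [], _, _, _, h2 => h2
  | _ :: _, _ :: _, c, d, h1, h2 => ⟨h1.1, rel_append c d h1.2 h2⟩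
  | [], _ :: _, _, _, h1, _ => absurd h1 (by simp [FlipRel])
  | _ :: _, [], _, _, h1, _ => absurd h1 (by simp [FlipRel])

/-- Pattern chars are never closing brackets, so a pattern occurrence in a flip image
reflects to one in the original. -/
lemma prefix_reflect : ∀ (p x y : List Char), FlipRel x y → (∀ c ∈ p, c ≠ ')' ∧ c ≠ ']') →
    p <+: y → p <+: x
  | [], _, _, _, _, _ => List.nil_prefix
  | a :: p', x, y, hxy, hcf, hp => by
    cases y with
    | nil => simp at hp
    | cons b y' =>
      cases x with
      | nil => exact absurd hxy (by simp [FlipRel])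
      | cons c x' =>
        rw [List.cons_prefix_cons] at hp ⊢
        obtain ⟨hab, hp'⟩ := hp
        have hb : a = c := by
          rcases hxy.1 with h1 | h1 | h1
          · rw [hab, h1]
          · exact absurd (hab.trans h1) (hcf a (by simp)).1
          · exact absurd (hab.trans h1) (hcf a (by simp)).2
        exact ⟨hb, prefix_reflect p' x' y' hxy.2 (fun c hc => hcf c (by simp [hc])) hp'⟩

/-- Well-formedness of a replace pair: closer-free pattern, flipped pointwise into the replacement. -/
def WfP (pr : Char × List Char × List Char) : Prop :=
  (∀ c ∈ (pr.1 :: pr.2.1), c ≠ ')' ∧ c ≠ ']') ∧ FlipRel (pr.1 :: pr.2.1) pr.2.2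

lemma wfP18 : ∀ pr ∈ P18, WfP pr := by
  intro pr hpr
  fin_cases hpr <;> exact ⟨by simp, rel_of_relB _ _ (by decide)⟩

lemma headEye : ∀ pr ∈ P18, isEye pr.1 = true := by decide

def shapeB (l : List Char) : Bool :=
  match l with
  | [p2] => isMouth p2
  | [p2, p3] => isNose p2 && isMouth p3
  | _ => false

lemma shape18 : ∀ pr ∈ P18, shapeB pr.2.1 = true := by decide

lemma shape_cases {l : List Char} (h : shapeB l = true) :
    (∃ p2, l = [p2] ∧ isMouth p2 = true) ∨
    (∃ p2 p3, l = [p2, p3] ∧ isNose p2 = true ∧ isMouth p3 = true) :=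
  match l with
  | [p2] => Or.inl ⟨p2, rfl, by simpa [shapeB] using h⟩
  | [p2, p3] => by
    simp only [shapeB, Bool.and_eq_true] at h
    exact Or.inr ⟨p2, p3, rfl, h.1, h.2⟩
  | [] => by simp [shapeB] at h
  | _ :: _ :: _ :: _ => by simp [shapeB] at h

lemma repScan_nil (o0 : Char) (orest new : List Char) : repScan o0 orest new [] = [] := by
  simp [repScan]

lemma repScan_no (o0 : Char) (orest new : List Char) (c : Char) (t : List Char)
    (h : ¬ (o0 :: orest) <+: (c :: t)) :
    repScan o0 orest new (c :: t) = c :: repScan o0 orest new t := by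
  rw [repScan, if_neg (by simpa [List.isPrefixOf_iff_prefix] using h)]

lemma repScan_yes (o0 : Char) (orest new X : List Char) :
    repScan o0 orest new ((o0 :: orest) ++ X) = new ++ repScan o0 orest new X := by
  rw [List.cons_append, repScan,
    if_pos (by simp [List.isPrefixOf_iff_prefix])]
  rw [List.drop_left]

lemma rel_repScan (o0 : Char) (orest new : List Char) (hw : FlipRel (o0 :: orest) new) :
    ∀ n l, l.length ≤ n → FlipRel l (repScan o0 orest new l) := by
  intro n
  induction n with
  | zero =>
    intro l hl
    have h0 : l = [] := by cases l <;> simp_all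
    subst h0; rw [repScan_nil]; trivial
  | succ n ih =>
    intro l hl
    cases l with
    | nil => rw [repScan_nil]; trivial
    | cons c t =>
      by_cases h : (o0 :: orest) <+: (c :: t)
      · obtain ⟨X, hX⟩ := h
        rw [← hX, repScan_yes]
        refine rel_append _ _ hw (ih X ?_)
        have := congrArg List.length hX
        simp at this hl
        omega
      · rw [repScan_no _ _ _ _ _ h]
        exact ⟨relC_refl c, ih t (by simp at hl; omega)⟩

lemma chain_nil : ∀ ps, chain ps [] = []
  | [] => rfl
  | pr :: ps => by
    show chain ps (repScan pr.1 pr.2.1 pr.2.2 []) = []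
    rw [repScan_nil]; exact chain_nil ps

lemma chain_cons (pr : Char × List Char × List Char) (ps : List (Char × List Char × List Char))
    (l : List Char) : chain (pr :: ps) l = chain ps (repScan pr.1 pr.2.1 pr.2.2 l) := rfl

lemma chain_append (ps qs : List (Char × List Char × List Char)) (l : List Char) :
    chain (ps ++ qs) l = chain qs (chain ps l) := by
  simp [chain, List.foldl_append]

/-- A character at which no pattern can start (in any flip image of the tail) passes
through the whole chain untouched. -/
lemma chainPassChar (c : Char) (t : List Char) :
    ∀ ps t0, (∀ pr ∈ ps, WfP pr) → FlipRel t t0 →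
    (∀ pr ∈ ps, ∀ t', FlipRel t t' → ¬ ((pr.1 :: pr.2.1) <+: (c :: t'))) →
    chain ps (c :: t0) = c :: chain ps t0 := by
  intro ps
  induction ps with
  | nil => intro t0 _ _ _; rfl
  | cons pr ps ih =>
    intro t0 wf hrel h
    have h1 : repScan pr.1 pr.2.1 pr.2.2 (c :: t0) = c :: repScan pr.1 pr.2.1 pr.2.2 t0 :=
      repScan_no _ _ _ _ _ (h pr (by simp) t0 hrel)
    rw [chain_cons, h1, chain_cons]
    exact ih (repScan pr.1 pr.2.1 pr.2.2 t0)
      (fun q hq => wf q (by simp [hq]))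
      (rel_trans hrel (rel_repScan _ _ _ (wf pr (by simp)).2 t0.length t0 le_rfl))
      (fun q hq => h q (by simp [hq]))

/-- `clash p bs` says `p` could be a prefix of `bs ++ T` for some `T`. -/
def clash : List Char → List Char → Bool
  | [], _ => true
  | _ :: _, [] => true
  | a :: p', b :: bs' => (a == b) && clash p' bs'

lemma prefix_clash : ∀ (p bs T : List Char), p <+: (bs ++ T) → clash p bs = true
  | [], _, _, _ => rfl
  | _ :: _, [], _, _ => rfl
  | a :: p', b :: bs', T, h => by
    rw [List.cons_append, List.cons_prefix_cons] at h
    simp [clash, h.1, prefix_clash p' bs' T h.2]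

/-- A block within which every pattern of the chain mismatches passes through untouched. -/
lemma blockPass (ps : List (Char × List Char × List Char)) (wf : ∀ pr ∈ ps, WfP pr) :
    ∀ (b t : List Char),
    (∀ pr ∈ ps, ∀ k < b.length, clash (pr.1 :: pr.2.1) (b.drop k) = false) →
    chain ps (b ++ t) = b ++ chain ps t := by
  intro b
  induction b with
  | nil => intro t _; simp
  | cons c b' ih =>
    intro t hb
    rw [List.cons_append]
    rw [chainPassChar c (b' ++ t) ps (b' ++ t) wf (rel_refl _) ?_]
    · rw [ih t (fun pr hpr k hk => by
        have := hb pr hpr (k + 1) (by simp; omega)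
        simpa using this)]
      rfl
    · intro pr hpr t' ht' hpfx
      have h2 : (pr.1 :: pr.2.1) <+: (c :: (b' ++ t)) :=
        prefix_reflect _ _ _ (rel_cons_intro (relC_refl c) ht') (wf pr hpr).1 hpfx
      have h3 := prefix_clash _ (c :: b') t h2
      have h4 := hb pr hpr 0 (by simp)
      simp only [List.drop_zero] at h4
      rw [h3] at h4
      exact absurd h4 (by simp)

/-- If the chain splits as `L1 ++ pr :: L2` and no other pair can fire inside `pr`'s
pattern or replacement, a match of `pr` at the head is rewritten and everything
else continues on the tail. -/
lemma matchBranch (L1 L2 : List (Char × List Char × List Char)) (o0 : Char)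
    (orest rep X : List Char)
    (hsplit : P18 = L1 ++ (o0, orest, rep) :: L2)
    (hb1 : ∀ pr ∈ L1, ∀ k < (o0 :: orest).length, clash (pr.1 :: pr.2.1) ((o0 :: orest).drop k) = false)
    (hb2 : ∀ pr ∈ L2, ∀ k < rep.length, clash (pr.1 :: pr.2.1) (rep.drop k) = false) :
    chain P18 ((o0 :: orest) ++ X) = rep ++ chain P18 X := by
  have wf1 : ∀ pr ∈ L1, WfP pr := fun pr h => wfP18 pr (by rw [hsplit]; simp [h])
  have wf2 : ∀ pr ∈ L2, WfP pr := fun pr h => wfP18 pr (by rw [hsplit]; simp [h])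
  rw [hsplit, chain_append, chain_append, blockPass L1 wf1 (o0 :: orest) X hb1,
    chain_cons, chain_cons, repScan_yes, blockPass L2 wf2 rep _ hb2]

lemma mb_0 (X : List Char) : chain P18 (':' :: '(' :: X) = ':' :: ')' :: chain P18 X := by
  have h := matchBranch []
    [(':', ['['], [':', ']']), (':', ['-', '('], [':', '-', ')']), (':', ['-', '['], [':', '-', ']']), (':', ['~', '('], [':', '~', ')']), (':', ['~', '['], [':', '~', ']']), (';', ['('], [';', ')']), (';', ['['], [';', ']']), (';', ['-', '('], [';', '-', ')']), (';', ['-', '['], [';', '-', ']']), (';', ['~', '('], [';', '~', ')']), (';', ['~', '['], [';', '~', ']']), ('=', ['('], ['=', ')']), ('=', ['['], ['=', ']']), ('=', ['-', '('], ['=', '-', ')']), ('=', ['-', '['], ['=', '-', ']']), ('=', ['~', '('], ['=', '~', ')']), ('=', ['~', '['], ['=', '~', ']'])]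
    ':' ['('] [':', ')'] X rfl (by decide) (by decide)
  simpa using h

lemma mb_1 (X : List Char) : chain P18 (':' :: '[' :: X) = ':' :: ']' :: chain P18 X := by
  have h := matchBranch [(':', ['('], [':', ')'])]
    [(':', ['-', '('], [':', '-', ')']), (':', ['-', '['], [':', '-', ']']), (':', ['~', '('], [':', '~', ')']), (':', ['~', '['], [':', '~', ']']), (';', ['('], [';', ')']), (';', ['['], [';', ']']), (';', ['-', '('], [';', '-', ')']), (';', ['-', '['], [';', '-', ']']), (';', ['~', '('], [';', '~', ')']), (';', ['~', '['], [';', '~', ']']), ('=', ['('], ['=', ')']), ('=', ['['], ['=', ']']), ('=', ['-', '('], ['=', '-', ')']), ('=', ['-', '['], ['=', '-', ']']), ('=', ['~', '('], ['=', '~', ')']), ('=', ['~', '['], ['=', '~', ']'])]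
    ':' ['['] [':', ']'] X rfl (by decide) (by decide)
  simpa using h

lemma mb_2 (X : List Char) : chain P18 (':' :: '-' :: '(' :: X) = ':' :: '-' :: ')' :: chain P18 X := by
  have h := matchBranch [(':', ['('], [':', ')']), (':', ['['], [':', ']'])]
    [(':', ['-', '['], [':', '-', ']']), (':', ['~', '('], [':', '~', ')']), (':', ['~', '['], [':', '~', ']']), (';', ['('], [';', ')']), (';', ['['], [';', ']']), (';', ['-', '('], [';', '-', ')']), (';', ['-', '['], [';', '-', ']']), (';', ['~', '('], [';', '~', ')']), (';', ['~', '['], [';', '~', ']']), ('=', ['('], ['=', ')']), ('=', ['['], ['=', ']']), ('=', ['-', '('], ['=', '-', ')']), ('=', ['-', '['], ['=', '-', ']']), ('=', ['~', '('], ['=', '~', ')']), ('=', ['~', '['], ['=', '~', ']'])]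
    ':' ['-', '('] [':', '-', ')'] X rfl (by decide) (by decide)
  simpa using h

lemma mb_3 (X : List Char) : chain P18 (':' :: '-' :: '[' :: X) = ':' :: '-' :: ']' :: chain P18 X := by
  have h := matchBranch [(':', ['('], [':', ')']), (':', ['['], [':', ']']), (':', ['-', '('], [':', '-', ')'])]
    [(':', ['~', '('], [':', '~', ')']), (':', ['~', '['], [':', '~', ']']), (';', ['('], [';', ')']), (';', ['['], [';', ']']), (';', ['-', '('], [';', '-', ')']), (';', ['-', '['], [';', '-', ']']), (';', ['~', '('], [';', '~', ')']), (';', ['~', '['], [';', '~', ']']), ('=', ['('], ['=', ')']), ('=', ['['], ['=', ']']), ('=', ['-', '('], ['=', '-', ')']), ('=', ['-', '['], ['=', '-', ']']), ('=', ['~', '('], ['=', '~', ')']), ('=', ['~', '['], ['=', '~', ']'])]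
    ':' ['-', '['] [':', '-', ']'] X rfl (by decide) (by decide)
  simpa using h

lemma mb_4 (X : List Char) : chain P18 (':' :: '~' :: '(' :: X) = ':' :: '~' :: ')' :: chain P18 X := by
  have h := matchBranch [(':', ['('], [':', ')']), (':', ['['], [':', ']']), (':', ['-', '('], [':', '-', ')']), (':', ['-', '['], [':', '-', ']'])]
    [(':', ['~', '['], [':', '~', ']']), (';', ['('], [';', ')']), (';', ['['], [';', ']']), (';', ['-', '('], [';', '-', ')']), (';', ['-', '['], [';', '-', ']']), (';', ['~', '('], [';', '~', ')']), (';', ['~', '['], [';', '~', ']']), ('=', ['('], ['=', ')']), ('=', ['['], ['=', ']']), ('=', ['-', '('], ['=', '-', ')']), ('=', ['-', '['], ['=', '-', ']']), ('=', ['~', '('], ['=', '~', ')']), ('=', ['~', '['], ['=', '~', ']'])]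
    ':' ['~', '('] [':', '~', ')'] X rfl (by decide) (by decide)
  simpa using h

lemma mb_5 (X : List Char) : chain P18 (':' :: '~' :: '[' :: X) = ':' :: '~' :: ']' :: chain P18 X := by
  have h := matchBranch [(':', ['('], [':', ')']), (':', ['['], [':', ']']), (':', ['-', '('], [':', '-', ')']), (':', ['-', '['], [':', '-', ']']), (':', ['~', '('], [':', '~', ')'])]
    [(';', ['('], [';', ')']), (';', ['['], [';', ']']), (';', ['-', '('], [';', '-', ')']), (';', ['-', '['], [';', '-', ']']), (';', ['~', '('], [';', '~', ')']), (';', ['~', '['], [';', '~', ']']), ('=', ['('], ['=', ')']), ('=', ['['], ['=', ']']), ('=', ['-', '('], ['=', '-', ')']), ('=', ['-', '['], ['=', '-', ']']), ('=', ['~', '('], ['=', '~', ')']), ('=', ['~', '['], ['=', '~', ']'])]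
    ':' ['~', '['] [':', '~', ']'] X rfl (by decide) (by decide)
  simpa using h

lemma mb_6 (X : List Char) : chain P18 (';' :: '(' :: X) = ';' :: ')' :: chain P18 X := by
  have h := matchBranch [(':', ['('], [':', ')']), (':', ['['], [':', ']']), (':', ['-', '('], [':', '-', ')']), (':', ['-', '['], [':', '-', ']']), (':', ['~', '('], [':', '~', ')']), (':', ['~', '['], [':', '~', ']'])]
    [(';', ['['], [';', ']']), (';', ['-', '('], [';', '-', ')']), (';', ['-', '['], [';', '-', ']']), (';', ['~', '('], [';', '~', ')']), (';', ['~', '['], [';', '~', ']']), ('=', ['('], ['=', ')']), ('=', ['['], ['=', ']']), ('=', ['-', '('], ['=', '-', ')']), ('=', ['-', '['], ['=', '-', ']']), ('=', ['~', '('], ['=', '~', ')']), ('=', ['~', '['], ['=', '~', ']'])]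
    ';' ['('] [';', ')'] X rfl (by decide) (by decide)
  simpa using h

lemma mb_7 (X : List Char) : chain P18 (';' :: '[' :: X) = ';' :: ']' :: chain P18 X := by
  have h := matchBranch [(':', ['('], [':', ')']), (':', ['['], [':', ']']), (':', ['-', '('], [':', '-', ')']), (':', ['-', '['], [':', '-', ']']), (':', ['~', '('], [':', '~', ')']), (':', ['~', '['], [':', '~', ']']), (';', ['('], [';', ')'])]
    [(';', ['-', '('], [';', '-', ')']), (';', ['-', '['], [';', '-', ']']), (';', ['~', '('], [';', '~', ')']), (';', ['~', '['], [';', '~', ']']), ('=', ['('], ['=', ')']), ('=', ['['], ['=', ']']), ('=', ['-', '('], ['=', '-', ')']), ('=', ['-', '['], ['=', '-', ']']), ('=', ['~', '('], ['=', '~', ')']), ('=', ['~', '['], ['=', '~', ']'])]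
    ';' ['['] [';', ']'] X rfl (by decide) (by decide)
  simpa using h

lemma mb_8 (X : List Char) : chain P18 (';' :: '-' :: '(' :: X) = ';' :: '-' :: ')' :: chain P18 X := by
  have h := matchBranch [(':', ['('], [':', ')']), (':', ['['], [':', ']']), (':', ['-', '('], [':', '-', ')']), (':', ['-', '['], [':', '-', ']']), (':', ['~', '('], [':', '~', ')']), (':', ['~', '['], [':', '~', ']']), (';', ['('], [';', ')']), (';', ['['], [';', ']'])]
    [(';', ['-', '['], [';', '-', ']']), (';', ['~', '('], [';', '~', ')']), (';', ['~', '['], [';', '~', ']']), ('=', ['('], ['=', ')']), ('=', ['['], ['=', ']']), ('=', ['-', '('], ['=', '-', ')']), ('=', ['-', '['], ['=', '-', ']']), ('=', ['~', '('], ['=', '~', ')']), ('=', ['~', '['], ['=', '~', ']'])]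
    ';' ['-', '('] [';', '-', ')'] X rfl (by decide) (by decide)
  simpa using h

lemma mb_9 (X : List Char) : chain P18 (';' :: '-' :: '[' :: X) = ';' :: '-' :: ']' :: chain P18 X := by
  have h := matchBranch [(':', ['('], [':', ')']), (':', ['['], [':', ']']), (':', ['-', '('], [':', '-', ')']), (':', ['-', '['], [':', '-', ']']), (':', ['~', '('], [':', '~', ')']), (':', ['~', '['], [':', '~', ']']), (';', ['('], [';', ')']), (';', ['['], [';', ']']), (';', ['-', '('], [';', '-', ')'])]
    [(';', ['~', '('], [';', '~', ')']), (';', ['~', '['], [';', '~', ']']), ('=', ['('], ['=', ')']), ('=', ['['], ['=', ']']), ('=', ['-', '('], ['=', '-', ')']), ('=', ['-', '['], ['=', '-', ']']), ('=', ['~', '('], ['=', '~', ')']), ('=', ['~', '['], ['=', '~', ']'])]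
    ';' ['-', '['] [';', '-', ']'] X rfl (by decide) (by decide)
  simpa using h

lemma mb_10 (X : List Char) : chain P18 (';' :: '~' :: '(' :: X) = ';' :: '~' :: ')' :: chain P18 X := by
  have h := matchBranch [(':', ['('], [':', ')']), (':', ['['], [':', ']']), (':', ['-', '('], [':', '-', ')']), (':', ['-', '['], [':', '-', ']']), (':', ['~', '('], [':', '~', ')']), (':', ['~', '['], [':', '~', ']']), (';', ['('], [';', ')']), (';', ['['], [';', ']']), (';', ['-', '('], [';', '-', ')']), (';', ['-', '['], [';', '-', ']'])]
    [(';', ['~', '['], [';', '~', ']']), ('=', ['('], ['=', ')']), ('=', ['['], ['=', ']']), ('=', ['-', '('], ['=', '-', ')']), ('=', ['-', '['], ['=', '-', ']']), ('=', ['~', '('], ['=', '~', ')']), ('=', ['~', '['], ['=', '~', ']'])]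
    ';' ['~', '('] [';', '~', ')'] X rfl (by decide) (by decide)
  simpa using h

lemma mb_11 (X : List Char) : chain P18 (';' :: '~' :: '[' :: X) = ';' :: '~' :: ']' :: chain P18 X := by
  have h := matchBranch [(':', ['('], [':', ')']), (':', ['['], [':', ']']), (':', ['-', '('], [':', '-', ')']), (':', ['-', '['], [':', '-', ']']), (':', ['~', '('], [':', '~', ')']), (':', ['~', '['], [':', '~', ']']), (';', ['('], [';', ')']), (';', ['['], [';', ']']), (';', ['-', '('], [';', '-', ')']), (';', ['-', '['], [';', '-', ']']), (';', ['~', '('], [';', '~', ')'])]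
    [('=', ['('], ['=', ')']), ('=', ['['], ['=', ']']), ('=', ['-', '('], ['=', '-', ')']), ('=', ['-', '['], ['=', '-', ']']), ('=', ['~', '('], ['=', '~', ')']), ('=', ['~', '['], ['=', '~', ']'])]
    ';' ['~', '['] [';', '~', ']'] X rfl (by decide) (by decide)
  simpa using h

lemma mb_12 (X : List Char) : chain P18 ('=' :: '(' :: X) = '=' :: ')' :: chain P18 X := by
  have h := matchBranch [(':', ['('], [':', ')']), (':', ['['], [':', ']']), (':', ['-', '('], [':', '-', ')']), (':', ['-', '['], [':', '-', ']']), (':', ['~', '('], [':', '~', ')']), (':', ['~', '['], [':', '~', ']']), (';', ['('], [';', ')']), (';', ['['], [';', ']']), (';', ['-', '('], [';', '-', ')']), (';', ['-', '['], [';', '-', ']']), (';', ['~', '('], [';', '~', ')']), (';', ['~', '['], [';', '~', ']'])]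
    [('=', ['['], ['=', ']']), ('=', ['-', '('], ['=', '-', ')']), ('=', ['-', '['], ['=', '-', ']']), ('=', ['~', '('], ['=', '~', ')']), ('=', ['~', '['], ['=', '~', ']'])]
    '=' ['('] ['=', ')'] X rfl (by decide) (by decide)
  simpa using h

lemma mb_13 (X : List Char) : chain P18 ('=' :: '[' :: X) = '=' :: ']' :: chain P18 X := by
  have h := matchBranch [(':', ['('], [':', ')']), (':', ['['], [':', ']']), (':', ['-', '('], [':', '-', ')']), (':', ['-', '['], [':', '-', ']']), (':', ['~', '('], [':', '~', ')']), (':', ['~', '['], [':', '~', ']']), (';', ['('], [';', ')']), (';', ['['], [';', ']']), (';', ['-', '('], [';', '-', ')']), (';', ['-', '['], [';', '-', ']']), (';', ['~', '('], [';', '~', ')']), (';', ['~', '['], [';', '~', ']']), ('=', ['('], ['=', ')'])]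
    [('=', ['-', '('], ['=', '-', ')']), ('=', ['-', '['], ['=', '-', ']']), ('=', ['~', '('], ['=', '~', ')']), ('=', ['~', '['], ['=', '~', ']'])]
    '=' ['['] ['=', ']'] X rfl (by decide) (by decide)
  simpa using h

lemma mb_14 (X : List Char) : chain P18 ('=' :: '-' :: '(' :: X) = '=' :: '-' :: ')' :: chain P18 X := by
  have h := matchBranch [(':', ['('], [':', ')']), (':', ['['], [':', ']']), (':', ['-', '('], [':', '-', ')']), (':', ['-', '['], [':', '-', ']']), (':', ['~', '('], [':', '~', ')']), (':', ['~', '['], [':', '~', ']']), (';', ['('], [';', ')']), (';', ['['], [';', ']']), (';', ['-', '('], [';', '-', ')']), (';', ['-', '['], [';', '-', ']']), (';', ['~', '('], [';', '~', ')']), (';', ['~', '['], [';', '~', ']']), ('=', ['('], ['=', ')']), ('=', ['['], ['=', ']'])]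
    [('=', ['-', '['], ['=', '-', ']']), ('=', ['~', '('], ['=', '~', ')']), ('=', ['~', '['], ['=', '~', ']'])]
    '=' ['-', '('] ['=', '-', ')'] X rfl (by decide) (by decide)
  simpa using h

lemma mb_15 (X : List Char) : chain P18 ('=' :: '-' :: '[' :: X) = '=' :: '-' :: ']' :: chain P18 X := by
  have h := matchBranch [(':', ['('], [':', ')']), (':', ['['], [':', ']']), (':', ['-', '('], [':', '-', ')']), (':', ['-', '['], [':', '-', ']']), (':', ['~', '('], [':', '~', ')']), (':', ['~', '['], [':', '~', ']']), (';', ['('], [';', ')']), (';', ['['], [';', ']']), (';', ['-', '('], [';', '-', ')']), (';', ['-', '['], [';', '-', ']']), (';', ['~', '('], [';', '~', ')']), (';', ['~', '['], [';', '~', ']']), ('=', ['('], ['=', ')']), ('=', ['['], ['=', ']']), ('=', ['-', '('], ['=', '-', ')'])]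
    [('=', ['~', '('], ['=', '~', ')']), ('=', ['~', '['], ['=', '~', ']'])]
    '=' ['-', '['] ['=', '-', ']'] X rfl (by decide) (by decide)
  simpa using h

lemma mb_16 (X : List Char) : chain P18 ('=' :: '~' :: '(' :: X) = '=' :: '~' :: ')' :: chain P18 X := by
  have h := matchBranch [(':', ['('], [':', ')']), (':', ['['], [':', ']']), (':', ['-', '('], [':', '-', ')']), (':', ['-', '['], [':', '-', ']']), (':', ['~', '('], [':', '~', ')']), (':', ['~', '['], [':', '~', ']']), (';', ['('], [';', ')']), (';', ['['], [';', ']']), (';', ['-', '('], [';', '-', ')']), (';', ['-', '['], [';', '-', ']']), (';', ['~', '('], [';', '~', ')']), (';', ['~', '['], [';', '~', ']']), ('=', ['('], ['=', ')']), ('=', ['['], ['=', ']']), ('=', ['-', '('], ['=', '-', ')']), ('=', ['-', '['], ['=', '-', ']'])]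
    [('=', ['~', '['], ['=', '~', ']'])]
    '=' ['~', '('] ['=', '~', ')'] X rfl (by decide) (by decide)
  simpa using h

lemma mb_17 (X : List Char) : chain P18 ('=' :: '~' :: '[' :: X) = '=' :: '~' :: ']' :: chain P18 X := by
  have h := matchBranch [(':', ['('], [':', ')']), (':', ['['], [':', ']']), (':', ['-', '('], [':', '-', ')']), (':', ['-', '['], [':', '-', ']']), (':', ['~', '('], [':', '~', ')']), (':', ['~', '['], [':', '~', ']']), (';', ['('], [';', ')']), (';', ['['], [';', ']']), (';', ['-', '('], [';', '-', ')']), (';', ['-', '['], [';', '-', ']']), (';', ['~', '('], [';', '~', ')']), (';', ['~', '['], [';', '~', ']']), ('=', ['('], ['=', ')']), ('=', ['['], ['=', ']']), ('=', ['-', '('], ['=', '-', ')']), ('=', ['-', '['], ['=', '-', ']']), ('=', ['~', '('], ['=', '~', ')'])]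
    []
    '=' ['~', '['] ['=', '~', ']'] X rfl (by decide) (by decide)
  simpa using h


-- ── pass-through discharge lemmas ────────────────────────────────────────────

lemma relC_resolve {d d' p2 : Char} (h : RelC d d') (he : p2 = d')
    (hcf : p2 ≠ ')' ∧ p2 ≠ ']') : p2 = d := by
  rcases h with rfl | rfl | rfl
  · exact he
  · exact absurd he hcf.1
  · exact absurd he hcf.2

lemma noPat_single (c : Char) :
    ∀ pr ∈ P18, ∀ t', FlipRel ([] : List Char) t' → ¬ ((pr.1 :: pr.2.1) <+: (c :: t')) := by
  intro pr hpr t' ht' hpfx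
  have h0 : t' = [] := by cases t' with | nil => rfl | cons b y => exact absurd ht' (by simp [FlipRel])
  subst h0
  rw [List.cons_prefix_cons] at hpfx
  have h2 := List.prefix_nil.mp hpfx.2
  have h3 := shape18 pr hpr
  rw [h2] at h3
  simp [shapeB] at h3

lemma noPat_not_eye {c : Char} (hc : isEye c = false) (t : List Char) :
    ∀ pr ∈ P18, ∀ t', FlipRel t t' → ¬ ((pr.1 :: pr.2.1) <+: (c :: t')) := by
  intro pr hpr t' _ hpfx
  rw [List.cons_prefix_cons] at hpfx
  have h1 := headEye pr hpr
  rw [hpfx.1, hc] at h1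
  exact absurd h1 (by simp)

lemma noPat_A {c d : Char} (hm : isMouth d = false) (hn : isNose d = false) (r : List Char) :
    ∀ pr ∈ P18, ∀ t', FlipRel (d :: r) t' → ¬ ((pr.1 :: pr.2.1) <+: (c :: t')) := by
  intro pr hpr t' ht' hpfx
  obtain ⟨d', r', rfl, hdd', -⟩ := rel_cons ht'
  rw [List.cons_prefix_cons] at hpfx
  have wf := wfP18 pr hpr
  rcases shape_cases (shape18 pr hpr) with ⟨p2, hl, hm2⟩ | ⟨p2, p3, hl, hn2, _⟩
  · have hp := hpfx.2; rw [hl, List.cons_prefix_cons] at hp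
    have he : p2 = d := relC_resolve hdd' hp.1 (wf.1 p2 (by rw [hl]; simp))
    rw [he] at hm2; rw [hm2] at hm; exact absurd hm (by simp)
  · have hp := hpfx.2; rw [hl, List.cons_prefix_cons] at hp
    have he : p2 = d := relC_resolve hdd' hp.1 (wf.1 p2 (by rw [hl]; simp))
    rw [he] at hn2; rw [hn2] at hn; exact absurd hn (by simp)

lemma noPat_B {c d x : Char} (hmd : isMouth d = false) (hmx : isMouth x = false)
    (r2 : List Char) :
    ∀ pr ∈ P18, ∀ t', FlipRel (d :: x :: r2) t' → ¬ ((pr.1 :: pr.2.1) <+: (c :: t')) := by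
  intro pr hpr t' ht' hpfx
  obtain ⟨d', r', rfl, hdd', hrest⟩ := rel_cons ht'
  rw [List.cons_prefix_cons] at hpfx
  have wf := wfP18 pr hpr
  rcases shape_cases (shape18 pr hpr) with ⟨p2, hl, hm2⟩ | ⟨p2, p3, hl, _, hm3⟩
  · have hp := hpfx.2; rw [hl, List.cons_prefix_cons] at hp
    have he : p2 = d := relC_resolve hdd' hp.1 (wf.1 p2 (by rw [hl]; simp))
    rw [he] at hm2; rw [hm2] at hmd; exact absurd hmd (by simp)
  · have hp := hpfx.2; rw [hl, List.cons_prefix_cons] at hp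
    obtain ⟨x', r'', rfl, hxx', -⟩ := rel_cons hrest
    have hp3 := hp.2; rw [List.cons_prefix_cons] at hp3
    have he : p3 = x := relC_resolve hxx' hp3.1 (wf.1 p3 (by rw [hl]; simp))
    rw [he] at hm3; rw [hm3] at hmx; exact absurd hmx (by simp)

lemma noPat_C {c d : Char} (hmd : isMouth d = false) :
    ∀ pr ∈ P18, ∀ t', FlipRel [d] t' → ¬ ((pr.1 :: pr.2.1) <+: (c :: t')) := by
  intro pr hpr t' ht' hpfx
  obtain ⟨d', r', rfl, hdd', hrest⟩ := rel_cons ht'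
  have h0 : r' = [] := by cases r' with | nil => rfl | cons b y => exact absurd hrest (by simp [FlipRel])
  subst h0
  rw [List.cons_prefix_cons] at hpfx
  have wf := wfP18 pr hpr
  rcases shape_cases (shape18 pr hpr) with ⟨p2, hl, hm2⟩ | ⟨p2, p3, hl, _, _⟩
  · have hp := hpfx.2; rw [hl, List.cons_prefix_cons] at hp
    have he : p2 = d := relC_resolve hdd' hp.1 (wf.1 p2 (by rw [hl]; simp))
    rw [he] at hm2; rw [hm2] at hmd; exact absurd hmd (by simp)
  · have hp := hpfx.2; rw [hl, List.cons_prefix_cons] at hp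
    have := List.prefix_nil.mp hp.2
    simp at this

lemma passAt (c : Char) (t : List Char)
    (h : ∀ pr ∈ P18, ∀ t', FlipRel t t' → ¬ ((pr.1 :: pr.2.1) <+: (c :: t'))) :
    chain P18 (c :: t) = c :: chain P18 t :=
  chainPassChar c t P18 t wfP18 (rel_refl t) h

-- ── main equivalence: the 18-pass chain computes B's single scan ─────────────

lemma chain_eq_scan : ∀ (n : Nat) (l : List Char), l.length ≤ n → chain P18 l = scanChars l := by
  intro n
  induction n with
  | zero =>
    intro l hl
    have h0 : l = [] := by cases l <;> simp_all
    subst h0; rw [chain_nil]; decide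
  | succ n ih =>
    intro l hl
    match l with
    | [] => rw [chain_nil]; decide
    | [c] =>
      rw [passAt c [] (noPat_single c), chain_nil]
      rw [scanChars.eq_def]
    | c :: d :: r =>
      by_cases hEc : isEye c = true
      · by_cases hMd : isMouth d = true
        · have hc : (c = ':' ∨ c = ';') ∨ c = '=' := by simpa [isEye] using hEc
          have hd : d = '(' ∨ d = '[' := by simpa [isMouth] using hMd
          have hr : r.length ≤ n := by simp at hl; omega
          rcases hc with (rfl | rfl) | rfl <;> rcases hd with rfl | rfl
          · rw [mb_0 r, ih r hr]; (conv_rhs => rw [scanChars.eq_def]); simp [isEye, isMouth, closeCh]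
          · rw [mb_1 r, ih r hr]; (conv_rhs => rw [scanChars.eq_def]); simp [isEye, isMouth, closeCh]
          · rw [mb_6 r, ih r hr]; (conv_rhs => rw [scanChars.eq_def]); simp [isEye, isMouth, closeCh]
          · rw [mb_7 r, ih r hr]; (conv_rhs => rw [scanChars.eq_def]); simp [isEye, isMouth, closeCh]
          · rw [mb_12 r, ih r hr]; (conv_rhs => rw [scanChars.eq_def]); simp [isEye, isMouth, closeCh]
          · rw [mb_13 r, ih r hr]; (conv_rhs => rw [scanChars.eq_def]); simp [isEye, isMouth, closeCh]
        · rw [Bool.not_eq_true] at hMd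
          by_cases hNd : isNose d = true
          · cases r with
            | nil =>
              rw [passAt c [d] (noPat_C hMd), passAt d [] (noPat_single d), chain_nil]
              (conv_rhs => rw [scanChars.eq_def]); simp [hEc, hMd, hNd]
            | cons x r2 =>
              by_cases hMx : isMouth x = true
              · have hc : (c = ':' ∨ c = ';') ∨ c = '=' := by simpa [isEye] using hEc
                have hd : d = '-' ∨ d = '~' := by simpa [isNose] using hNd
                have hx : x = '(' ∨ x = '[' := by simpa [isMouth] using hMx
                have hr : r2.length ≤ n := by simp at hl; omega
                rcases hc with (rfl | rfl) | rfl <;> rcases hd with rfl | rfl <;>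
                  rcases hx with rfl | rfl
                · rw [mb_2 r2, ih r2 hr]; (conv_rhs => rw [scanChars.eq_def]); simp [isEye, isMouth, isNose, closeCh]
                · rw [mb_3 r2, ih r2 hr]; (conv_rhs => rw [scanChars.eq_def]); simp [isEye, isMouth, isNose, closeCh]
                · rw [mb_4 r2, ih r2 hr]; (conv_rhs => rw [scanChars.eq_def]); simp [isEye, isMouth, isNose, closeCh]
                · rw [mb_5 r2, ih r2 hr]; (conv_rhs => rw [scanChars.eq_def]); simp [isEye, isMouth, isNose, closeCh]
                · rw [mb_8 r2, ih r2 hr]; (conv_rhs => rw [scanChars.eq_def]); simp [isEye, isMouth, isNose, closeCh]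
                · rw [mb_9 r2, ih r2 hr]; (conv_rhs => rw [scanChars.eq_def]); simp [isEye, isMouth, isNose, closeCh]
                · rw [mb_10 r2, ih r2 hr]; (conv_rhs => rw [scanChars.eq_def]); simp [isEye, isMouth, isNose, closeCh]
                · rw [mb_11 r2, ih r2 hr]; (conv_rhs => rw [scanChars.eq_def]); simp [isEye, isMouth, isNose, closeCh]
                · rw [mb_14 r2, ih r2 hr]; (conv_rhs => rw [scanChars.eq_def]); simp [isEye, isMouth, isNose, closeCh]
                · rw [mb_15 r2, ih r2 hr]; (conv_rhs => rw [scanChars.eq_def]); simp [isEye, isMouth, isNose, closeCh]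
                · rw [mb_16 r2, ih r2 hr]; (conv_rhs => rw [scanChars.eq_def]); simp [isEye, isMouth, isNose, closeCh]
                · rw [mb_17 r2, ih r2 hr]; (conv_rhs => rw [scanChars.eq_def]); simp [isEye, isMouth, isNose, closeCh]
              · rw [Bool.not_eq_true] at hMx
                rw [passAt c (d :: x :: r2) (noPat_B hMd hMx r2),
                  ih (d :: x :: r2) (by simp at hl ⊢; omega)]
                (conv_rhs => rw [scanChars.eq_def]); simp [hEc, hMd, hNd, hMx]
          · rw [Bool.not_eq_true] at hNd
            rw [passAt c (d :: r) (noPat_A hMd hNd r), ih (d :: r) (by simp at hl ⊢; omega)]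
            (conv_rhs => rw [scanChars.eq_def]); simp [hEc, hMd, hNd]
      · rw [Bool.not_eq_true] at hEc
        rw [passAt c (d :: r) (noPat_not_eye hEc (d :: r)), ih (d :: r) (by simp at hl ⊢; omega)]
        (conv_rhs => rw [scanChars.eq_def]); simp [hEc]

-- ── bridging A's port to the chain ───────────────────────────────────────────

lemma go_spec : ∀ (fuel : Nat) (o0 : Char) (orest new l acc : List Char), l.length ≤ fuel →
    PySem.Chars.replace.go (o0 :: orest) new fuel l acc = acc.reverse ++ repScan o0 orest new l := by
  intro fuel
  induction fuel with
  | zero =>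
    intro o0 orest new l acc hl
    have h0 : l = [] := by cases l <;> simp_all
    subst h0
    simp [PySem.Chars.replace.go, repScan_nil]
  | succ f ihf =>
    intro o0 orest new l acc hl
    cases l with
    | nil => simp [PySem.Chars.replace.go, repScan_nil]
    | cons c t =>
      have hgo : PySem.Chars.replace.go (o0 :: orest) new (f + 1) (c :: t) acc =
          if (o0 :: orest).isPrefixOf (c :: t) then
            PySem.Chars.replace.go (o0 :: orest) new f (t.drop orest.length) (new.reverse ++ acc)
          else PySem.Chars.replace.go (o0 :: orest) new f t (c :: acc) := by
        rw [PySem.Chars.replace.go]; simp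
      rw [hgo]
      split_ifs with h
      · rw [ihf _ _ _ _ _ (by simp at hl ⊢; omega)]
        rw [repScan, if_pos h]
        simp
      · rw [ihf _ _ _ _ _ (by simp at hl; omega)]
        rw [repScan, if_neg h]
        simp

lemma replace_eq (l : List Char) (o0 : Char) (orest new : List Char) :
    PySem.Chars.replace l (o0 :: orest) new = repScan o0 orest new l := by
  rw [PySem.Chars.replace]
  simpa using go_spec l.length o0 orest new l [] le_rfl

lemma smile_toList (s : String) : (smile s).toList = chain P18 s.toList := by
  have e1 : (":;=" : String).toList = [':', ';', '='] := by decide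
  have e2 : (" -~" : String).toList = [' ', '-', '~'] := by decide
  have e3 : ("([" : String).toList = ['(', '['] := by decide
  rw [smile, e1, e2, e3]
  simp [chain, P18, List.foldl, PySem.Str.toList_replace, replace_eq]

-- ===== VERDICT (by name: the statement is the Claim_ definition above) =====
theorem smile_spec : Claim_equal_smile := by
  intro s _
  unfold Spec_smile smile_alt
  have h1 : (smile s).toList = scanChars s.toList := by
    rw [smile_toList, chain_eq_scan s.toList.length s.toList le_rfl]
  calc smile s = String.ofList (smile s).toList := by rw [String.ofList_toList]
    _ = String.ofList (scanChars s.toList) := by rw [h1]
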